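-- pv_equiv track=rewrite | github.com/TimoficiucDaniel/Fundamentals-of-Programming | a2-Timoficiuc-Daniel/src/program.py | find_real_number_sequence
-- ===== SOURCE A (Python) =====
-- def find_real_number_sequence(numberlist): # function that finds the longest sequence of real numbers
--     lengthmax = 0
--     positionmax = 0
--     count = 0
--     length = 0
--     for lists in numberlist: #we go through the list and check if its a real number
--         if get_imag(lists) == 0: # if it is we increase the length and set the position in the original list
--             if length == 0:
--                 position = count
--             length += 1
--
--         else:
--             if length > lengthmax: # otherwise we compare
--                 lengthmax = length
--                 positionmax = position
--             length = 0
--         count += 1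
--     if length > lengthmax: #final test
--         lengthmax = length
--         positionmax = position
--     return positionmax, lengthmax # return the start position of the sequence in the original list and its length
--
-- def get_imag(number): # get imaginary part
--     return number[1]
-- ===== SOURCE B (Python) =====
-- def find_real_number_sequence(numberlist):
--     # Build the list of maximal runs of real numbers (start, length), then pick
--     # the earliest longest run; (0, 0) when there is no real number.
--     runs = []
--     i, n = 0, len(numberlist)
--     while i < n:
--         if numberlist[i][1] == 0:
--             j = i
--             while j < n and numberlist[j][1] == 0:
--                 j += 1
--             runs.append((i, j - i))
--             i = j
--         else:
--             i += 1
--     best_pos, best_len = 0, 0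
--     for pos, ln in runs:
--         if ln > best_len:
--             best_pos, best_len = pos, ln
--     return best_pos, best_len
-- ===== Notes on version B (the rewrite author's own statement) =====
-- stated objective: alternative
-- what changed: Replaces A's single stateful scan (five loop variables with deferred best-updates and a trailing final test) by run-build-then-select: first materialize all maximal real runs as (start, length) pairs, then pick the earliest longest run with a simple fold.
import Mathlib
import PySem

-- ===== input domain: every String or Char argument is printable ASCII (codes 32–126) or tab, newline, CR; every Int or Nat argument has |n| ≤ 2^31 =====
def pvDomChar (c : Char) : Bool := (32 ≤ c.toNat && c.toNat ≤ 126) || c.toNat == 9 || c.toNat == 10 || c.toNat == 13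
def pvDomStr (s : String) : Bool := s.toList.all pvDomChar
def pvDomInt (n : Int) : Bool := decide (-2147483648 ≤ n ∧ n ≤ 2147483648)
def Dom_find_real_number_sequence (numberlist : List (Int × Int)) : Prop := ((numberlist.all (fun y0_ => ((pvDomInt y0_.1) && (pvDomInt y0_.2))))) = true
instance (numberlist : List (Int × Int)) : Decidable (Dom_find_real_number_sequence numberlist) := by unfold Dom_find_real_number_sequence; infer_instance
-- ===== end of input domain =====

-- B rebuilds the answer as run-build-then-select instead of A's single stateful scan; same cost (alternative decomposition).
-- ===== PORT A =====
def get_imag (number : Int × Int) : Int := number.2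

-- loop body of A's for-loop; state = (lengthmax, positionmax, count, length, position)
def pvStepA (s : Int × Int × Int × Int × Int) (lists : Int × Int) : Int × Int × Int × Int × Int :=
  match s with
  | (lengthmax, positionmax, count, length, position) =>
    if get_imag lists == 0 then
      let position := if length == 0 then count else position
      (lengthmax, positionmax, count + 1, length + 1, position)
    else
      if length > lengthmax then (length, position, count + 1, 0, position)
      else (lengthmax, positionmax, count + 1, 0, position)

def find_real_number_sequence (numberlist : List (Int × Int)) : Int × Int :=
  match numberlist.foldl pvStepA (0, 0, 0, 0, 0) with
  | (lengthmax, positionmax, _, length, position) =>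
    if length > lengthmax then (position, length) else (positionmax, lengthmax)

-- ===== PORT B =====
-- inner while loop of Source B: length of the leading run of real numbers
def pvRealPrefixLen : List (Int × Int) → Nat
  | [] => 0
  | x :: xs => if x.2 == 0 then pvRealPrefixLen xs + 1 else 0

theorem pvRealPrefixLen_le (l : List (Int × Int)) : pvRealPrefixLen l ≤ l.length := by
  induction l with
  | nil => simp [pvRealPrefixLen]
  | cons x xs ih =>
    by_cases h : x.2 = 0
    · simp [pvRealPrefixLen, h]
      omega
    · simp [pvRealPrefixLen, h]

-- outer while loop of Source B: collect all maximal runs of real numbers as (start, length)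
def pvCollectRuns : List (Int × Int) → Int → List (Int × Int)
  | [], _ => []
  | x :: xs, i =>
    if x.2 == 0 then
      let k := pvRealPrefixLen (x :: xs)
      (i, (k : Int)) :: pvCollectRuns (List.drop k (x :: xs)) (i + (k : Int))
    else
      pvCollectRuns xs (i + 1)
termination_by l _ => l.length
decreasing_by
  · have : pvRealPrefixLen (x :: xs) = pvRealPrefixLen xs + 1 := by
      simp [pvRealPrefixLen, *]
    have h2 := pvRealPrefixLen_le xs
    simp only [List.length_drop, List.length_cons]
    omega
  · simp

-- selection step of Source B's final for-loop
def pvSelect (best : Int × Int) (r : Int × Int) : Int × Int :=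
  if r.2 > best.2 then r else best

def find_real_number_sequence_alt (numberlist : List (Int × Int)) : Int × Int :=
  (pvCollectRuns numberlist 0).foldl pvSelect (0, 0)

-- ===== PRECONDITION & SPEC =====
def Spec_find_real_number_sequence (numberlist : List (Int × Int)) (out : Int × Int) : Prop := out = find_real_number_sequence_alt numberlist
instance (numberlist : List (Int × Int)) (out : Int × Int) : Decidable (Spec_find_real_number_sequence numberlist out) := by unfold Spec_find_real_number_sequence; infer_instance

-- ===== CLAIM (what is proved, stated in full; the proofs are below) =====
def Claim_equal_find_real_number_sequence : Prop := ∀ (numberlist : List (Int × Int)), Dom_find_real_number_sequence numberlist → Spec_find_real_number_sequence numberlist (find_real_number_sequence numberlist)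

-- ===== LEMMAS AND PROOFS =====

-- A's final test after the loop, as a function of the final state
def pvFinalize (s : Int × Int × Int × Int × Int) : Int × Int :=
  match s with
  | (lengthmax, positionmax, _, length, position) =>
    if length > lengthmax then (position, length) else (positionmax, lengthmax)

theorem findA_eq (l : List (Int × Int)) :
    find_real_number_sequence l = pvFinalize (l.foldl pvStepA (0, 0, 0, 0, 0)) := rfl

-- while inside a run (length > 0), A's loop consumes the leading real prefix,
-- incrementing count and length and leaving everything else untouched
theorem run_lemma (l : List (Int × Int)) :
    ∀ (lm pm i len pos : Int), 0 < len →
    l.foldl pvStepA (lm, pm, i, len, pos)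
      = (List.drop (pvRealPrefixLen l) l).foldl pvStepA
          (lm, pm, i + (pvRealPrefixLen l : Int), len + (pvRealPrefixLen l : Int), pos) := by
  induction l with
  | nil => intro lm pm i len pos _; simp [pvRealPrefixLen]
  | cons x xs ih =>
    intro lm pm i len pos hlen
    by_cases h : x.2 = 0
    · have hstep : pvStepA (lm, pm, i, len, pos) x = (lm, pm, i + 1, len + 1, pos) := by
        simp [pvStepA, get_imag, h]
        omega
      have hk : pvRealPrefixLen (x :: xs) = pvRealPrefixLen xs + 1 := by
        simp [pvRealPrefixLen, h]
      rw [List.foldl_cons, hstep, ih lm pm (i + 1) (len + 1) pos (by omega), hk]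
      simp only [List.drop_succ_cons]
      push_cast
      ring_nf
    · have hk : pvRealPrefixLen (x :: xs) = 0 := by simp [pvRealPrefixLen, h]
      simp [hk]

-- after the maximal real prefix, the next element (if any) is not real
theorem drop_head_not_real (l : List (Int × Int)) :
    ∀ y ys, List.drop (pvRealPrefixLen l) l = y :: ys → ¬ y.2 = 0 := by
  induction l with
  | nil => intro y ys h; simp [pvRealPrefixLen] at h
  | cons x xs ih =>
    intro y ys h
    by_cases hx : x.2 = 0
    · have hk : pvRealPrefixLen (x :: xs) = pvRealPrefixLen xs + 1 := by
        simp [pvRealPrefixLen, hx]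
      rw [hk, List.drop_succ_cons] at h
      exact ih y ys h
    · have hk : pvRealPrefixLen (x :: xs) = 0 := by simp [pvRealPrefixLen, hx]
      rw [hk, List.drop_zero] at h
      cases h
      exact hx

-- main invariant: starting between runs (length = 0) with 0 ≤ lengthmax,
-- A's loop + final test equals B's selection fold over the remaining runs
theorem main_lemma (l : List (Int × Int)) (lm pm i p : Int) (hlm : 0 ≤ lm) :
    pvFinalize (l.foldl pvStepA (lm, pm, i, 0, p))
      = (pvCollectRuns l i).foldl pvSelect (pm, lm) := by
  match l with
  | [] =>
    simp [pvCollectRuns, pvFinalize]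
    omega
  | x :: xs =>
    by_cases h : x.2 = 0
    · have hstep : pvStepA (lm, pm, i, 0, p) x = (lm, pm, i + 1, 1, i) := by
        simp [pvStepA, get_imag, h]
      have hk : pvRealPrefixLen (x :: xs) = pvRealPrefixLen xs + 1 := by
        simp [pvRealPrefixLen, h]
      have hrun := run_lemma xs lm pm (i + 1) 1 i one_pos
      have ecast : (1 : Int) + (pvRealPrefixLen xs : Int) = ((pvRealPrefixLen xs + 1 : Nat) : Int) := by
        push_cast; ring
      have ecast2 : i + 1 + (pvRealPrefixLen xs : Int) = i + ((pvRealPrefixLen xs + 1 : Nat) : Int) := by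
        push_cast; ring
      rw [ecast, ecast2] at hrun
      have hcr : pvCollectRuns (x :: xs) i
          = (i, ((pvRealPrefixLen xs + 1 : Nat) : Int)) ::
            pvCollectRuns (List.drop (pvRealPrefixLen xs) xs) (i + ((pvRealPrefixLen xs + 1 : Nat) : Int)) := by
        rw [pvCollectRuns]
        simp [h, hk, List.drop_succ_cons]
      rw [List.foldl_cons, hstep, hrun, hcr]
      cases hrest : List.drop (pvRealPrefixLen xs) xs with
      | nil =>
        simp [pvCollectRuns, pvFinalize, pvSelect]
      | cons y ys =>
        have hy : ¬ y.2 = 0 := drop_head_not_real xs y ys hrest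
        have hcr2 : pvCollectRuns (y :: ys) (i + ((pvRealPrefixLen xs + 1 : Nat) : Int))
            = pvCollectRuns ys (i + ((pvRealPrefixLen xs + 1 : Nat) : Int) + 1) := by
          rw [pvCollectRuns]
          simp [hy]
        rw [hcr2, List.foldl_cons, List.foldl_cons]
        have hystep : pvStepA (lm, pm, i + ((pvRealPrefixLen xs + 1 : Nat) : Int),
              ((pvRealPrefixLen xs + 1 : Nat) : Int), i) y
            = if ((pvRealPrefixLen xs + 1 : Nat) : Int) > lm
              then (((pvRealPrefixLen xs + 1 : Nat) : Int), i,
                    i + ((pvRealPrefixLen xs + 1 : Nat) : Int) + 1, (0 : Int), i)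
              else (lm, pm, i + ((pvRealPrefixLen xs + 1 : Nat) : Int) + 1, (0 : Int), i) := by
          simp [pvStepA, get_imag, hy]
        rw [hystep]
        by_cases hcmp : ((pvRealPrefixLen xs + 1 : Nat) : Int) > lm
        · rw [if_pos hcmp]
          rw [main_lemma ys ((pvRealPrefixLen xs + 1 : Nat) : Int) i
                (i + ((pvRealPrefixLen xs + 1 : Nat) : Int) + 1) i (by positivity)]
          have hsel : pvSelect (pm, lm) (i, ((pvRealPrefixLen xs + 1 : Nat) : Int))
              = (i, ((pvRealPrefixLen xs + 1 : Nat) : Int)) := by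
            unfold pvSelect
            exact if_pos hcmp
          rw [hsel]
        · rw [if_neg hcmp]
          rw [main_lemma ys lm pm (i + ((pvRealPrefixLen xs + 1 : Nat) : Int) + 1) i hlm]
          have hsel : pvSelect (pm, lm) (i, ((pvRealPrefixLen xs + 1 : Nat) : Int)) = (pm, lm) := by
            unfold pvSelect
            rw [if_neg hcmp]
          rw [hsel]
    · have hstep : pvStepA (lm, pm, i, 0, p) x = (lm, pm, i + 1, 0, p) := by
        simp [pvStepA, get_imag, h]
        omega
      rw [List.foldl_cons, hstep, main_lemma xs lm pm (i + 1) p hlm, pvCollectRuns]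
      simp [h]
  termination_by l.length
  decreasing_by
  · have h1 := congrArg List.length hrest
    simp only [List.length_drop, List.length_cons] at h1
    simp only [List.length_cons]
    omega
  · have h1 := congrArg List.length hrest
    simp only [List.length_drop, List.length_cons] at h1
    simp only [List.length_cons]
    omega
  · simp only [List.length_cons]
    omega

-- ===== VERDICT (by name: the statement is the Claim_ definition above) =====
theorem find_real_number_sequence_spec : Claim_equal_find_real_number_sequence := by
  intro l _
  unfold Spec_find_real_number_sequence find_real_number_sequence_alt
  rw [findA_eq, main_lemma l 0 0 0 0 le_rfl]
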